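-- pv_equiv track=rewrite | github.com/gabadabaduu/Taller2Algoritmos | taller2.py | analyze_sentiments
-- ===== SOURCE A (Python) =====
-- def analyze_sentiments(tokens):
--     positive_words = ['bueno', 'feliz', 'positivo']
--     negative_words = ['mal', 'triste', 'negativo']
--
--     positive_count = sum(1 for word in tokens if word in positive_words)
--     negative_count = sum(1 for word in tokens if word in negative_words)
--
--     if positive_count > negative_count:
--         return "Positivo"
--     elif negative_count > positive_count:
--         return "Negativo"
--     else:
--         return "Neutral"
-- ===== SOURCE B (Python) =====
-- def analyze_sentiments(tokens):
--     polarity = {'bueno': 1, 'feliz': 1, 'positivo': 1,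
--                 'mal': -1, 'triste': -1, 'negativo': -1}
--     score = 0
--     for word in tokens:
--         score += polarity.get(word, 0)
--     if score > 0:
--         return "Positivo"
--     if score < 0:
--         return "Negativo"
--     return "Neutral"
-- ===== Notes on version B (the rewrite author's own statement) =====
-- stated objective: simpler
-- what changed: Replaces the two separate counting passes over tokens (positive count, negative count) by a single pass maintaining one signed score via a word->polarity dict; the sign of the score drives the same branches.
import Mathlib
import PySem

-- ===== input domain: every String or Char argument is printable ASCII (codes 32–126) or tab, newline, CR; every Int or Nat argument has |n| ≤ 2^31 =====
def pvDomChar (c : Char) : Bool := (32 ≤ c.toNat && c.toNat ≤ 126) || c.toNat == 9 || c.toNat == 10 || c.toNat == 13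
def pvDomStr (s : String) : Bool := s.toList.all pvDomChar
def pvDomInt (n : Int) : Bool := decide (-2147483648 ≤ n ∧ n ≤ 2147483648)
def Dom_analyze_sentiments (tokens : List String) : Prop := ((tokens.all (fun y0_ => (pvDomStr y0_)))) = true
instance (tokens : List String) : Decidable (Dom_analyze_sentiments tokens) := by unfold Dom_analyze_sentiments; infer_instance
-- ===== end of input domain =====

-- B replaces A's two counting passes by one pass with a signed score from a polarity dict (objective: simpler).

-- ===== PORT A =====
def analyze_sentiments (tokens : List String) : String :=
  let positive_words : List String := ["bueno", "feliz", "positivo"]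
  let negative_words : List String := ["mal", "triste", "negativo"]
  let positive_count : Int := tokens.foldl (fun acc word => if word ∈ positive_words then acc + 1 else acc) 0
  let negative_count : Int := tokens.foldl (fun acc word => if word ∈ negative_words then acc + 1 else acc) 0
  if positive_count > negative_count then "Positivo"
  else if negative_count > positive_count then "Negativo"
  else "Neutral"

-- ===== PORT B =====
def pvPolarity : PySem.Dict String Int :=
  PySem.Dict.mk [("bueno", 1), ("feliz", 1), ("positivo", 1),
                 ("mal", -1), ("triste", -1), ("negativo", -1)]

def analyze_sentiments_alt (tokens : List String) : String :=
  let score : Int := tokens.foldl (fun s word => s + pvPolarity.getD word 0) 0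
  if score > 0 then "Positivo"
  else if score < 0 then "Negativo"
  else "Neutral"

-- ===== PRECONDITION & SPEC =====
def Spec_analyze_sentiments (tokens : List String) (out : String) : Prop := out = analyze_sentiments_alt tokens
instance (tokens : List String) (out : String) : Decidable (Spec_analyze_sentiments tokens out) := by unfold Spec_analyze_sentiments; infer_instance

-- ===== CLAIM (what is proved, stated in full; the proofs are below) =====
def Claim_equal_analyze_sentiments : Prop := ∀ (tokens : List String), Dom_analyze_sentiments tokens → Spec_analyze_sentiments tokens (analyze_sentiments tokens)

-- ===== LEMMAS AND PROOFS =====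

lemma contrib (w : String) :
    pvPolarity.getD w 0 =
      (if w ∈ (["bueno", "feliz", "positivo"] : List String) then (1 : Int) else 0)
      - (if w ∈ (["mal", "triste", "negativo"] : List String) then (1 : Int) else 0) := by
  simp only [pvPolarity, PySem.Dict.getD, PySem.Dict.get?_mk_cons, List.mem_cons,
    List.not_mem_nil, or_false, beq_iff_eq]
  by_cases h1 : w = "bueno" <;> by_cases h2 : w = "feliz" <;> by_cases h3 : w = "positivo" <;>
    by_cases h4 : w = "mal" <;> by_cases h5 : w = "triste" <;> by_cases h6 : w = "negativo" <;>
    simp_all [eq_comm, PySem.Dict.get?]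

lemma fold_eq (tokens : List String) : ∀ (p n s : Int), s = p - n →
    tokens.foldl (fun s word => s + pvPolarity.getD word 0) s =
      tokens.foldl (fun acc word => if word ∈ (["bueno", "feliz", "positivo"] : List String) then acc + 1 else acc) p
      - tokens.foldl (fun acc word => if word ∈ (["mal", "triste", "negativo"] : List String) then acc + 1 else acc) n := by
  induction tokens with
  | nil => intro p n s h; simpa using h
  | cons w ws ih =>
      intro p n s h
      simp only [List.foldl_cons]
      apply ih
      rw [contrib w]
      split_ifs <;> omega

-- ===== VERDICT (by name: the statement is the Claim_ definition above) =====
theorem analyze_sentiments_spec : Claim_equal_analyze_sentiments := by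
  intro tokens _
  unfold Spec_analyze_sentiments analyze_sentiments analyze_sentiments_alt
  have h := fold_eq tokens 0 0 0 (by ring)
  simp only [h]
  split_ifs <;> first | rfl | omega
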